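-- pv_equiv track=rewrite | github.com/scirafra/historical-racing-manager | src/teams.py | _update_money_for_team
-- ===== SOURCE A (Python) =====
-- def _update_money_for_team(row):
--     """Calculate profit based on the number of finance employees."""
--     earn_coef = [12000, 11000, 10000, 9000, 8000, 7000, 6000, 5000, 4000, 3000, 2000, 1000, 0]
--     money, fin = row["money"], row["fin"]
--
--     for coef in earn_coef:
--         if fin <= 0:
--             break
--         used = min(fin, 100)
--         money += coef * used
--         fin -= used
--
--     row["money"] = int(money)
--     row["fin"] = int(fin)
--     return row
-- ===== SOURCE B (Python) =====
-- def _update_money_for_team(row):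
--     """Closed-form profit: no loop over the tier coefficients."""
--     money, fin = row["money"], row["fin"]
--     used = min(max(fin, 0), 1300)
--     q, r = divmod(used, 100)
--     money += 100 * (12000 * q - 1000 * q * (q - 1) // 2) + (12000 - 1000 * q) * r
--     row["money"] = int(money)
--     row["fin"] = int(fin - used)
--     return row
-- ===== Notes on version B (the rewrite author's own statement) =====
-- stated objective: simpler
-- what changed: Replaces the 13-iteration loop over the tier coefficients with a closed-form sum: used = min(max(fin,0),1300), q,r = divmod(used,100), profit = 100*(12000*q - 1000*q*(q-1)//2) + (12000-1000*q)*r.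
import Mathlib
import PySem

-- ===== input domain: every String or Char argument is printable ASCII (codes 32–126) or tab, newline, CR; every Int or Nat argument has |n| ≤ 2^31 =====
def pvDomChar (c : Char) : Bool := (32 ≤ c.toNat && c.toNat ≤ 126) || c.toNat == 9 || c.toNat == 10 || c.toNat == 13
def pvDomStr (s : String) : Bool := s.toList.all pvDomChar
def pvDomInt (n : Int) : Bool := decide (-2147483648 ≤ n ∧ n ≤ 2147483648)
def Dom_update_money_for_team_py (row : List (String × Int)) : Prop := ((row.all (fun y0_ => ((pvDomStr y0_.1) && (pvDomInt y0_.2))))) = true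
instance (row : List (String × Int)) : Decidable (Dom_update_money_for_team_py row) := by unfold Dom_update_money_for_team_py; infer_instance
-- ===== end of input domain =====

-- B replaces A's 13-step loop over the tier coefficients by a closed-form sum (simpler, no loop).
-- Both A and B mutate the dict in place in Python; the equivalence here is about the returned value.

-- ===== PORT A =====
-- the loop 'for coef in earn_coef: if fin <= 0: break; …' carrying (money, fin)
def earnLoopA : List Int → Int → Int → Int × Int
  | [], money, fin => (money, fin)
  | c :: cs, money, fin =>
    if fin ≤ 0 then (money, fin)
    else earnLoopA cs (money + c * min fin 100) (fin - min fin 100)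

def update_money_for_team_py (row : List (String × Int)) : List (String × Int) :=
  let d := PySem.Dict.mk row
  match d.get? "money", d.get? "fin" with
  | some money, some fin =>
      let p := earnLoopA [12000, 11000, 10000, 9000, 8000, 7000, 6000, 5000, 4000, 3000, 2000, 1000, 0] money fin
      (((d.insert "money" p.1).insert "fin" p.2)).items
  | _, _ => row   -- unreachable under Pre_ (Python raises KeyError)

-- ===== PORT B =====
def update_money_for_team_py_alt (row : List (String × Int)) : List (String × Int) :=
  let d := PySem.Dict.mk row
  match d.get? "money" with
  | none => row   -- unreachable under Pre_ (Python raises KeyError)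
  | some money =>
    match d.get? "fin" with
    | none => row   -- unreachable under Pre_ (Python raises KeyError)
    | some fin =>
      let used := min (max fin 0) 1300
      let q := PySem.Int.floordiv used 100
      let r := PySem.Int.mod used 100
      let m := money + 100 * (12000 * q - PySem.Int.floordiv (1000 * q * (q - 1)) 2) + (12000 - 1000 * q) * r
      (((d.insert "money" m).insert "fin" (fin - used))).items

-- ===== PRECONDITION & SPEC =====
-- Pre_ excludes exactly the rows missing the "money" or "fin" key, on which Python A raises KeyError.
def Pre_update_money_for_team_py (row : List (String × Int)) : Prop :=
  ((PySem.Dict.mk row).contains "money" = true) ∧ ((PySem.Dict.mk row).contains "fin" = true)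
instance (row : List (String × Int)) : Decidable (Pre_update_money_for_team_py row) := by unfold Pre_update_money_for_team_py; infer_instance
def pvWitness_update_money_for_team_py : (List (String × Int)) := [("money", 500), ("fin", 250)]

def Spec_update_money_for_team_py (row : List (String × Int)) (out : List (String × Int)) : Prop := out = update_money_for_team_py_alt row
instance (row : List (String × Int)) (out : List (String × Int)) : Decidable (Spec_update_money_for_team_py row out) := by unfold Spec_update_money_for_team_py; infer_instance

-- ===== CLAIM (what is proved, stated in full; the proofs are below) =====
def Claim_equal_update_money_for_team_py : Prop := ∀ (row : List (String × Int)), Dom_update_money_for_team_py row → Pre_update_money_for_team_py row → Spec_update_money_for_team_py row (update_money_for_team_py row)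

-- ===== LEMMAS AND PROOFS =====

-- A's loop equals B's closed form, for every starting money and fin.
theorem earnLoopA_break (cs : List Int) (money fin : Int) (h : fin ≤ 0) :
    earnLoopA cs money fin = (money, fin) := by
  cases cs <;> simp [earnLoopA, h]

theorem earnLoopA_partial (c : Int) (cs : List Int) (money fin : Int) (h0 : 0 < fin)
    (h1 : fin ≤ 100) : earnLoopA (c :: cs) money fin = (money + c * fin, 0) := by
  rw [earnLoopA, if_neg (by omega)]
  rw [show min fin 100 = fin from by omega]
  rw [show fin - fin = (0 : Int) from by ring, earnLoopA_break _ _ _ (by omega)]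

theorem earnLoopA_full (q : Nat) (cs : List Int) (money fin : Int) (hq : q ≤ cs.length)
    (h : 100 * (q : Int) ≤ fin) :
    earnLoopA cs money fin
      = earnLoopA (cs.drop q) (money + 100 * (cs.take q).sum) (fin - 100 * (q : Int)) := by
  induction q generalizing cs money fin with
  | zero => simp
  | succ n ih =>
    cases cs with
    | nil => simp at hq
    | cons c cs' =>
      rw [earnLoopA, if_neg (by push_cast at h; omega)]
      rw [show min fin 100 = 100 from by push_cast at h; omega]
      rw [ih cs' _ _ (by simpa using hq) (by push_cast at h ⊢; omega)]
      simp only [List.drop_succ_cons, List.take_succ_cons, List.sum_cons]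
      congr 1 <;> push_cast <;> ring

theorem earnLoopA_closed (money fin : Int) :
    earnLoopA [12000, 11000, 10000, 9000, 8000, 7000, 6000, 5000, 4000, 3000, 2000, 1000, 0] money fin
      = (money + 100 * (12000 * (PySem.Int.floordiv (min (max fin 0) 1300) 100)
            - PySem.Int.floordiv (1000 * (PySem.Int.floordiv (min (max fin 0) 1300) 100) * ((PySem.Int.floordiv (min (max fin 0) 1300) 100) - 1)) 2)
          + (12000 - 1000 * (PySem.Int.floordiv (min (max fin 0) 1300) 100)) * (PySem.Int.mod (min (max fin 0) 1300) 100),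
        fin - min (max fin 0) 1300) := by
  rw [PySem.Int.floordiv_eq_ediv_of_pos (a := min (max fin 0) 1300) (by norm_num),
      PySem.Int.mod_eq_emod_of_pos (a := min (max fin 0) 1300) (by norm_num),
      PySem.Int.floordiv_eq_ediv_of_pos (b := 2) (by norm_num)]
  have hq13 : min (max fin 0) 1300 / 100 = 0 ∨ min (max fin 0) 1300 / 100 = 1 ∨
      min (max fin 0) 1300 / 100 = 2 ∨ min (max fin 0) 1300 / 100 = 3 ∨
      min (max fin 0) 1300 / 100 = 4 ∨ min (max fin 0) 1300 / 100 = 5 ∨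
      min (max fin 0) 1300 / 100 = 6 ∨ min (max fin 0) 1300 / 100 = 7 ∨
      min (max fin 0) 1300 / 100 = 8 ∨ min (max fin 0) 1300 / 100 = 9 ∨
      min (max fin 0) 1300 / 100 = 10 ∨ min (max fin 0) 1300 / 100 = 11 ∨
      min (max fin 0) 1300 / 100 = 12 ∨ min (max fin 0) 1300 / 100 = 13 := by omega
  rcases hq13 with hq|hq|hq|hq|hq|hq|hq|hq|hq|hq|hq|hq|hq|hq
  · -- q = 0
      by_cases hb : fin ≤ 0
      · rw [earnLoopA_break _ _ _ hb, hq]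
        simp only [Prod.mk.injEq]; constructor <;> omega
      · rw [earnLoopA_partial _ _ _ _ (by omega) (by omega), hq]
        simp only [Prod.mk.injEq]; constructor <;> omega
  · -- q = 1
      rw [earnLoopA_full 1 _ money fin (by decide) (by omega)]
      simp only [List.drop_succ_cons, List.drop_zero, List.take_succ_cons, List.take_zero,
        List.sum_cons, List.sum_nil]
      by_cases hb : fin - 100 * ((1 : Nat) : Int) ≤ 0
      · rw [earnLoopA_break _ _ _ hb, hq]
        simp only [Prod.mk.injEq]; constructor <;> omega
      · rw [earnLoopA_partial _ _ _ _ (by omega) (by omega), hq]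
        simp only [Prod.mk.injEq]; constructor <;> omega
  · -- q = 2
      rw [earnLoopA_full 2 _ money fin (by decide) (by omega)]
      simp only [List.drop_succ_cons, List.drop_zero, List.take_succ_cons, List.take_zero,
        List.sum_cons, List.sum_nil]
      by_cases hb : fin - 100 * ((2 : Nat) : Int) ≤ 0
      · rw [earnLoopA_break _ _ _ hb, hq]
        simp only [Prod.mk.injEq]; constructor <;> omega
      · rw [earnLoopA_partial _ _ _ _ (by omega) (by omega), hq]
        simp only [Prod.mk.injEq]; constructor <;> omega
  · -- q = 3
      rw [earnLoopA_full 3 _ money fin (by decide) (by omega)]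
      simp only [List.drop_succ_cons, List.drop_zero, List.take_succ_cons, List.take_zero,
        List.sum_cons, List.sum_nil]
      by_cases hb : fin - 100 * ((3 : Nat) : Int) ≤ 0
      · rw [earnLoopA_break _ _ _ hb, hq]
        simp only [Prod.mk.injEq]; constructor <;> omega
      · rw [earnLoopA_partial _ _ _ _ (by omega) (by omega), hq]
        simp only [Prod.mk.injEq]; constructor <;> omega
  · -- q = 4
      rw [earnLoopA_full 4 _ money fin (by decide) (by omega)]
      simp only [List.drop_succ_cons, List.drop_zero, List.take_succ_cons, List.take_zero,
        List.sum_cons, List.sum_nil]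
      by_cases hb : fin - 100 * ((4 : Nat) : Int) ≤ 0
      · rw [earnLoopA_break _ _ _ hb, hq]
        simp only [Prod.mk.injEq]; constructor <;> omega
      · rw [earnLoopA_partial _ _ _ _ (by omega) (by omega), hq]
        simp only [Prod.mk.injEq]; constructor <;> omega
  · -- q = 5
      rw [earnLoopA_full 5 _ money fin (by decide) (by omega)]
      simp only [List.drop_succ_cons, List.drop_zero, List.take_succ_cons, List.take_zero,
        List.sum_cons, List.sum_nil]
      by_cases hb : fin - 100 * ((5 : Nat) : Int) ≤ 0
      · rw [earnLoopA_break _ _ _ hb, hq]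
        simp only [Prod.mk.injEq]; constructor <;> omega
      · rw [earnLoopA_partial _ _ _ _ (by omega) (by omega), hq]
        simp only [Prod.mk.injEq]; constructor <;> omega
  · -- q = 6
      rw [earnLoopA_full 6 _ money fin (by decide) (by omega)]
      simp only [List.drop_succ_cons, List.drop_zero, List.take_succ_cons, List.take_zero,
        List.sum_cons, List.sum_nil]
      by_cases hb : fin - 100 * ((6 : Nat) : Int) ≤ 0
      · rw [earnLoopA_break _ _ _ hb, hq]
        simp only [Prod.mk.injEq]; constructor <;> omega
      · rw [earnLoopA_partial _ _ _ _ (by omega) (by omega), hq]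
        simp only [Prod.mk.injEq]; constructor <;> omega
  · -- q = 7
      rw [earnLoopA_full 7 _ money fin (by decide) (by omega)]
      simp only [List.drop_succ_cons, List.drop_zero, List.take_succ_cons, List.take_zero,
        List.sum_cons, List.sum_nil]
      by_cases hb : fin - 100 * ((7 : Nat) : Int) ≤ 0
      · rw [earnLoopA_break _ _ _ hb, hq]
        simp only [Prod.mk.injEq]; constructor <;> omega
      · rw [earnLoopA_partial _ _ _ _ (by omega) (by omega), hq]
        simp only [Prod.mk.injEq]; constructor <;> omega
  · -- q = 8
      rw [earnLoopA_full 8 _ money fin (by decide) (by omega)]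
      simp only [List.drop_succ_cons, List.drop_zero, List.take_succ_cons, List.take_zero,
        List.sum_cons, List.sum_nil]
      by_cases hb : fin - 100 * ((8 : Nat) : Int) ≤ 0
      · rw [earnLoopA_break _ _ _ hb, hq]
        simp only [Prod.mk.injEq]; constructor <;> omega
      · rw [earnLoopA_partial _ _ _ _ (by omega) (by omega), hq]
        simp only [Prod.mk.injEq]; constructor <;> omega
  · -- q = 9
      rw [earnLoopA_full 9 _ money fin (by decide) (by omega)]
      simp only [List.drop_succ_cons, List.drop_zero, List.take_succ_cons, List.take_zero,
        List.sum_cons, List.sum_nil]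
      by_cases hb : fin - 100 * ((9 : Nat) : Int) ≤ 0
      · rw [earnLoopA_break _ _ _ hb, hq]
        simp only [Prod.mk.injEq]; constructor <;> omega
      · rw [earnLoopA_partial _ _ _ _ (by omega) (by omega), hq]
        simp only [Prod.mk.injEq]; constructor <;> omega
  · -- q = 10
      rw [earnLoopA_full 10 _ money fin (by decide) (by omega)]
      simp only [List.drop_succ_cons, List.drop_zero, List.take_succ_cons, List.take_zero,
        List.sum_cons, List.sum_nil]
      by_cases hb : fin - 100 * ((10 : Nat) : Int) ≤ 0
      · rw [earnLoopA_break _ _ _ hb, hq]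
        simp only [Prod.mk.injEq]; constructor <;> omega
      · rw [earnLoopA_partial _ _ _ _ (by omega) (by omega), hq]
        simp only [Prod.mk.injEq]; constructor <;> omega
  · -- q = 11
      rw [earnLoopA_full 11 _ money fin (by decide) (by omega)]
      simp only [List.drop_succ_cons, List.drop_zero, List.take_succ_cons, List.take_zero,
        List.sum_cons, List.sum_nil]
      by_cases hb : fin - 100 * ((11 : Nat) : Int) ≤ 0
      · rw [earnLoopA_break _ _ _ hb, hq]
        simp only [Prod.mk.injEq]; constructor <;> omega
      · rw [earnLoopA_partial _ _ _ _ (by omega) (by omega), hq]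
        simp only [Prod.mk.injEq]; constructor <;> omega
  · -- q = 12
      rw [earnLoopA_full 12 _ money fin (by decide) (by omega)]
      simp only [List.drop_succ_cons, List.drop_zero, List.take_succ_cons, List.take_zero,
        List.sum_cons, List.sum_nil]
      by_cases hb : fin - 100 * ((12 : Nat) : Int) ≤ 0
      · rw [earnLoopA_break _ _ _ hb, hq]
        simp only [Prod.mk.injEq]; constructor <;> omega
      · rw [earnLoopA_partial _ _ _ _ (by omega) (by omega), hq]
        simp only [Prod.mk.injEq]; constructor <;> omega
  · -- q = 13
      rw [earnLoopA_full 13 _ money fin (by decide) (by omega)]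
      simp only [List.drop_succ_cons, List.drop_zero, List.take_succ_cons, List.take_zero,
        List.sum_cons, List.sum_nil, earnLoopA]
      rw [hq]
      simp only [Prod.mk.injEq]; constructor <;> omega

-- ===== VERDICT (by name: the statement is the Claim_ definition above) =====
theorem update_money_for_team_py_spec : Claim_equal_update_money_for_team_py := by
  intro row _ hpre
  obtain ⟨hm, hf⟩ := hpre
  rw [PySem.Dict.contains_eq_isSome_get?] at hm hf
  obtain ⟨money, h1⟩ := Option.isSome_iff_exists.mp hm
  obtain ⟨fin, h2⟩ := Option.isSome_iff_exists.mp hf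
  unfold Spec_update_money_for_team_py update_money_for_team_py update_money_for_team_py_alt
  simp only [h1, h2, earnLoopA_closed]
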